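-- pv_equiv track=rewrite | github.com/caleberi/leetcody | python/numberOfDistinctSubstringPresent.py | numberOfDistinctSubstringPresentOptimal
-- ===== SOURCE A (Python) =====
-- def isDistinct(string):
--     h = {}
--     prev = ""
--     for i in range(len(string)):
--         ch = string[i]
--         if ch not in h:
--             if prev == "":
--                 prev = ch
--             if prev != "" and prev != ch:
--                 return False
--             h[ch] = True
--     return True
--
-- def numberOfDistinctSubstringPresentOptimal(string):
--     ret = []
--     end = 0
--     start = 0
--     while start != len(string)-1:
--         substring = string[start:end+1]
--         unique = isDistinct(substring)
--         if unique:
--             if start <= end and end == len(string)-1: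
--                 start += 1
--                 ret.append(substring)
--                 end = start
--                 continue
--             else:
--                 ret.append(substring)
--                 end += 1
--                 continue
--         start += 1
--         end = start
--     ret.append(string[-1])
--     return len(ret)
-- ===== SOURCE B (Python) =====
-- def numberOfDistinctSubstringPresentOptimal(string):
--     # One linear pass over maximal runs of equal characters: a run of
--     # length L contributes L*(L+1)//2 counted windows.
--     total = 0
--     i = 0
--     n = len(string)
--     while i < n:
--         j = i
--         while j < n and string[j] == string[i]:
--             j += 1
--         L = j - i
--         total += L * (L + 1) // 2
--         i = j
--     return total
-- ===== Notes on version B (the rewrite author's own statement) =====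
-- stated objective: faster
-- what changed: Replaces the growing two-pointer window that re-slices the string and rescans each slice with a dict-based homogeneity test by a single linear pass over maximal runs of equal characters, adding L*(L+1)//2 per run; Pre_ excludes only the empty string, on which A loops forever (B returns 0).
import Mathlib
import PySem

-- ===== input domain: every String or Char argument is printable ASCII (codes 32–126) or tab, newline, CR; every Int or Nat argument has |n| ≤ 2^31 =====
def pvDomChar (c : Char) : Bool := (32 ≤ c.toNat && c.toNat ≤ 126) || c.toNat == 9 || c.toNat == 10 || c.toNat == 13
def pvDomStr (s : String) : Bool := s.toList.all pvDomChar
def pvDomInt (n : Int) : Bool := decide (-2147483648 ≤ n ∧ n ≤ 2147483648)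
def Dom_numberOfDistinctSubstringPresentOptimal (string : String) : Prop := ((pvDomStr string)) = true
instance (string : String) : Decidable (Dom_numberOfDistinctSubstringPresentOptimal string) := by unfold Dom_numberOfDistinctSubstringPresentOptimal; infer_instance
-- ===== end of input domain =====

-- B replaces A's growing-window loop (which re-slices the string and rescans every slice
-- with a dict-based same-character test) by one pass over maximal runs of equal characters,
-- adding L*(L+1)//2 per run; equality of the return values is proved for every nonempty
-- string (A's while-loop never terminates on "", which Pre_ excludes).

-- ===== PORT A =====
-- helper isDistinct: dict h, prev accumulator, loop over indices with early return False
def isDistinctGo (l : List Char) (i : Nat) (h : PySem.Dict Char Bool) (prev : List Char) : Bool :=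
  if hi : i < l.length then
    if h.contains l[i] = false then
      if (if prev = [] then [l[i]] else prev) ≠ [] ∧ (if prev = [] then [l[i]] else prev) ≠ [l[i]]
      then false
      else isDistinctGo l (i + 1) (h.insert l[i] true) (if prev = [] then [l[i]] else prev)
    else isDistinctGo l (i + 1) h prev
  else true
termination_by l.length - i

def isDistinct (l : List Char) : Bool := isDistinctGo l 0 PySem.Dict.empty []

-- the while-loop of A; fuel makes the recursion total (Python diverges on "", which Pre_
-- excludes; on Pre_ the fuel chosen below is proved sufficient)
def aLoop (cs : List Char) (fuel start e : Nat) (ret : List (List Char)) :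
    Option (List (List Char)) :=
  match fuel with
  | 0 => none
  | f + 1 =>
    if start = cs.length - 1 then some ret
    else
      if isDistinct (PySem.List.slice cs (some (start : Int)) (some ((e : Int) + 1))) then
        if start ≤ e ∧ e = cs.length - 1 then
          aLoop cs f (start + 1) (start + 1)
            (ret ++ [PySem.List.slice cs (some (start : Int)) (some ((e : Int) + 1))])
        else
          aLoop cs f start (e + 1)
            (ret ++ [PySem.List.slice cs (some (start : Int)) (some ((e : Int) + 1))])
      else aLoop cs f (start + 1) (start + 1) ret

def numberOfDistinctSubstringPresentOptimal (string : String) : Int :=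
  match aLoop string.toList ((string.toList.length + 1) * (string.toList.length + 1)) 0 0 [] with
  | some ret =>
      match PySem.List.pyGet? string.toList (-1) with
      | some c => ((ret ++ [[c]]).length : Int)
      | none => 0
  | none => 0

-- ===== PORT B =====
-- inner while loop of B: how many chars of the tail continue the run of c
def runLen (c : Char) : List Char → Nat
  | [] => 0
  | x :: xs => if x = c then 1 + runLen c xs else 0

-- outer while loop of B: advance run by run, accumulating the total
def altGo (l : List Char) (total : Int) : Int :=
  match l with
  | [] => total
  | c :: xs =>
      altGo (xs.drop (runLen c xs))
        (total + PySem.Int.floordiv ((1 + (runLen c xs : Int)) * (1 + (runLen c xs : Int) + 1)) 2)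
termination_by l.length
decreasing_by simp only [List.length_drop, List.length_cons]; omega

def numberOfDistinctSubstringPresentOptimal_alt (string : String) : Int :=
  altGo string.toList 0

-- ===== PRECONDITION & SPEC =====
-- Pre_ excludes exactly the empty string, on which A's while-loop never terminates.
def Pre_numberOfDistinctSubstringPresentOptimal (string : String) : Prop :=
  string.toList ≠ []
instance (string : String) : Decidable (Pre_numberOfDistinctSubstringPresentOptimal string) := by
  unfold Pre_numberOfDistinctSubstringPresentOptimal; infer_instance

def pvWitness_numberOfDistinctSubstringPresentOptimal : String := "aab"

def Spec_numberOfDistinctSubstringPresentOptimal (string : String) (out : Int) : Prop := out = numberOfDistinctSubstringPresentOptimal_alt string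
instance (string : String) (out : Int) : Decidable (Spec_numberOfDistinctSubstringPresentOptimal string out) := by unfold Spec_numberOfDistinctSubstringPresentOptimal; infer_instance

-- ===== CLAIM (what is proved, stated in full; the proofs are below) =====
def Claim_equal_numberOfDistinctSubstringPresentOptimal : Prop := ∀ (string : String), Dom_numberOfDistinctSubstringPresentOptimal string → Pre_numberOfDistinctSubstringPresentOptimal string → Spec_numberOfDistinctSubstringPresentOptimal string (numberOfDistinctSubstringPresentOptimal string)

-- ===== LEMMAS AND PROOFS =====

-- sum over all suffixes of the length of the head run (proof-side quantity)
def sumSuf : List Char → Nat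
  | [] => 0
  | c :: xs => (1 + runLen c xs) + sumSuf xs

def headRun : List Char → Nat
  | [] => 0
  | c :: xs => 1 + runLen c xs

lemma runLen_le_length (c : Char) (xs : List Char) : runLen c xs ≤ xs.length := by
  induction xs with
  | nil => simp [runLen]
  | cons x xs ih => simp only [runLen, List.length_cons]; split_ifs <;> omega

lemma headRun_le_length (t : List Char) : headRun t ≤ t.length := by
  cases t with
  | nil => simp [headRun]
  | cons c xs =>
      have := runLen_le_length c xs
      simp only [headRun, List.length_cons]; omega

lemma sumSuf_pos (t : List Char) (h : t ≠ []) : 1 ≤ sumSuf t := by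
  cases t with
  | nil => simp at h
  | cons c xs => simp only [sumSuf]; omega

lemma tri (m : Nat) : (m + 1) + m * (m + 1) / 2 = (m + 1) * (m + 2) / 2 := by
  have he : m * (m + 1) / 2 * 2 = m * (m + 1) :=
    Nat.div_two_mul_two_of_even (Nat.even_mul_succ_self m)
  have h2 : (m + 1) * (m + 2) = 2 * ((m + 1) + m * (m + 1) / 2) := by
    have : (m + 1) * (m + 2) = m * (m + 1) + 2 * (m + 1) := by ring
    omega
  rw [h2, Nat.mul_div_cancel_left _ (by norm_num : 0 < 2)]

lemma sumSuf_run (xs : List Char) (c : Char) :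
    sumSuf (c :: xs) =
      headRun (c :: xs) * (headRun (c :: xs) + 1) / 2 + sumSuf (xs.drop (runLen c xs)) := by
  induction xs with
  | nil => simp [sumSuf, headRun, runLen]
  | cons x xs ih =>
      by_cases hx : x = c
      · subst hx
        have hr : runLen x (x :: xs) = 1 + runLen x xs := by simp [runLen]
        have hh2 : headRun (x :: x :: xs) = (1 + runLen x xs) + 1 := by
          simp [headRun, runLen]; omega
        have hh' : headRun (x :: xs) = 1 + runLen x xs := rfl
        rw [hh'] at ih
        set m := 1 + runLen x xs with hm
        have hs : sumSuf (x :: x :: xs) = (m + 1) + sumSuf (x :: xs) := by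
          simp [sumSuf, hm]; omega
        have hd : (x :: xs).drop (runLen x (x :: xs)) = xs.drop (runLen x xs) := by
          rw [hr]; simp [Nat.add_comm 1 (runLen x xs), hm]
        rw [hs, ih, hh2, hd]
        have h1 : m + 1 + 1 = m + 2 := rfl
        rw [h1, ← tri m]
        omega
      · have hr : runLen c (x :: xs) = 0 := by simp [runLen, hx]
        simp [sumSuf, headRun, hr]

lemma altGo_eq (n : Nat) : ∀ (l : List Char), l.length ≤ n → ∀ (total : Int),
    altGo l total = total + (sumSuf l : Int) := by
  induction n with
  | zero =>
      intro l hl total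
      have : l = [] := List.eq_nil_of_length_eq_zero (by omega)
      subst this; simp [altGo, sumSuf]
  | succ n ih =>
      intro l hl total
      cases l with
      | nil => simp [altGo, sumSuf]
      | cons c xs =>
          rw [altGo]
          have hdl : (xs.drop (runLen c xs)).length ≤ n := by
            simp only [List.length_drop]
            simp only [List.length_cons] at hl
            omega
          rw [ih (xs.drop (runLen c xs)) hdl]
          have hfd : PySem.Int.floordiv ((1 + (runLen c xs : Int)) * (1 + (runLen c xs : Int) + 1)) 2
              = (((1 + runLen c xs) * (1 + runLen c xs + 1) / 2 : Nat) : Int) := by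
            have hc : ((1 + (runLen c xs : Int)) * (1 + (runLen c xs : Int) + 1))
                = (((1 + runLen c xs) * (1 + runLen c xs + 1) : Nat) : Int) := by push_cast; ring
            rw [hc]
            exact_mod_cast PySem.Int.floordiv_natCast _ 2
          rw [hfd]
          have hrun := sumSuf_run xs c
          have hh : headRun (c :: xs) = 1 + runLen c xs := rfl
          rw [hh] at hrun
          rw [hrun]
          push_cast
          ring

lemma all_take_iff_le_runLen (c : Char) : ∀ (xs : List Char) (k : Nat), k ≤ xs.length →
    (((xs.take k).all (· == c)) = true ↔ k ≤ runLen c xs) := by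
  intro xs
  induction xs with
  | nil =>
      intro k hk
      have : k = 0 := by simpa using hk
      subst this; simp
  | cons x xs ih =>
      intro k hk
      cases k with
      | zero => simp
      | succ k' =>
          have hk' : k' ≤ xs.length := by simpa using hk
          have hih := ih k' hk'
          by_cases hx : x = c
          · simp only [List.take_succ_cons, List.all_cons, Bool.and_eq_true, beq_iff_eq,
              runLen, if_pos hx]
            constructor
            · rintro ⟨-, h2⟩; have := hih.mp h2; omega
            · intro hle; exact ⟨hx, hih.mpr (by omega)⟩
          · simp only [List.take_succ_cons, List.all_cons, Bool.and_eq_true, beq_iff_eq,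
              runLen, if_neg hx]
            constructor
            · rintro ⟨h1, -⟩; exact absurd h1 hx
            · omega

lemma isDistinctGo_spec (l : List Char) (c : Char) :
    ∀ (d i : Nat), l.length - i = d →
    ∀ (h : PySem.Dict Char Bool), h.get? c = some true →
    (∀ ch, h.contains ch = true → ch = c) →
    isDistinctGo l i h [c] = (l.drop i).all (· == c) := by
  intro d
  induction d with
  | zero =>
      intro i hi h h1 h2
      rw [isDistinctGo, dif_neg (by omega), List.drop_eq_nil_of_le (by omega)]
      simp
  | succ d ih =>
      intro i hi h h1 h2
      have hlt : i < l.length := by omega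
      have hdrop : l.drop i = l[i] :: l.drop (i + 1) := List.drop_eq_getElem_cons hlt
      rw [isDistinctGo]
      simp only [dif_pos hlt]
      by_cases hc : h.contains l[i] = false
      · by_cases hci : l[i] = c
        · exfalso
          have hcc : h.contains c = true := by
            rw [PySem.Dict.contains_eq_isSome_get?, h1]; rfl
          rw [hci, hcc] at hc
          exact absurd hc (by decide)
        · rw [if_pos hc]
          have hprev : (if ([c] : List Char) = [] then [l[i]] else [c]) = [c] := by simp
          rw [hprev]
          rw [if_pos ⟨by simp, by simpa using fun he => hci he.symm⟩]
          have hb : (l[i] == c) = false := by simpa using hci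
          rw [hdrop, List.all_cons, hb, Bool.false_and]
      · rw [if_neg hc]
        rw [ih (i + 1) (by omega) h h1 h2, hdrop]
        have hci : l[i] = c := h2 _ (by revert hc; cases hcc : h.contains l[i] <;> simp)
        simp [hci]

lemma isDistinct_cons (c : Char) (xs : List Char) : isDistinct (c :: xs) = xs.all (· == c) := by
  rw [isDistinct, isDistinctGo]
  have hlt : 0 < (c :: xs).length := by simp
  simp only [dif_pos hlt, List.getElem_cons_zero, PySem.Dict.contains_empty, if_true]
  rw [if_neg (by simp)]
  rw [isDistinctGo_spec (c :: xs) c ((c :: xs).length - (0 + 1)) (0 + 1) rfl _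
    (PySem.Dict.get?_insert_self _ _ _)
    (fun ch hch => by
      rw [PySem.Dict.contains_insert] at hch
      simpa [PySem.Dict.contains_empty] using hch)]
  simp

lemma isDistinct_take (t : List Char) (m : Nat) (hne : t ≠ []) (h1 : 1 ≤ m)
    (h2 : m ≤ t.length) : (isDistinct (t.take m) = true ↔ m ≤ headRun t) := by
  cases t with
  | nil => exact absurd rfl hne
  | cons c rest =>
      obtain ⟨k, rfl⟩ : ∃ k, m = k + 1 := ⟨m - 1, by omega⟩
      rw [List.take_succ_cons, isDistinct_cons]
      have := all_take_iff_le_runLen c rest k (by simp only [List.length_cons] at h2; omega)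
      rw [this]
      have hh : headRun (c :: rest) = 1 + runLen c rest := rfl
      rw [hh]
      omega

lemma aLoop_phase (j : Nat) : ∀ (cs : List Char) (fuel start e : Nat) (ret : List (List Char)),
    start + 1 < cs.length → start ≤ e → e ≤ cs.length - 1 →
    start + headRun (cs.drop start) = e + j →
    cs.length - e + 1 ≤ fuel →
    ∃ fuel' A, aLoop cs fuel start e ret = aLoop cs fuel' (start + 1) (start + 1) (ret ++ A) ∧
      A.length = j ∧ fuel ≤ fuel' + (cs.length - e) + 1 := by
  induction j with
  | zero =>
      intro cs fuel start e ret h1 h2 h3 h4 h5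
      obtain ⟨f, rfl⟩ : ∃ f, fuel = f + 1 := ⟨fuel - 1, by omega⟩
      rw [aLoop, if_neg (by omega : ¬ start = cs.length - 1)]
      have hcast : ((e : Int) + 1) = ((e + 1 : Nat) : Int) := by push_cast; ring
      rw [hcast, PySem.List.slice_natCast]
      have hdl : (cs.drop start).length = cs.length - start := by simp
      have hhom : isDistinct ((cs.drop start).take (e + 1 - start)) = false := by
        by_cases hb : isDistinct ((cs.drop start).take (e + 1 - start)) = true
        · have := (isDistinct_take (cs.drop start) (e + 1 - start)
            (List.ne_nil_of_length_pos (by omega)) (by omega) (by omega)).mp hb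
          omega
        · simpa using hb
      rw [if_neg (by simp [hhom])]
      exact ⟨f, [], by rw [List.append_nil], rfl, by omega⟩
  | succ k ih =>
      intro cs fuel start e ret h1 h2 h3 h4 h5
      obtain ⟨f, rfl⟩ : ∃ f, fuel = f + 1 := ⟨fuel - 1, by omega⟩
      rw [aLoop, if_neg (by omega : ¬ start = cs.length - 1)]
      have hcast : ((e : Int) + 1) = ((e + 1 : Nat) : Int) := by push_cast; ring
      rw [hcast, PySem.List.slice_natCast]
      have hdl : (cs.drop start).length = cs.length - start := by simp
      have hhom : isDistinct ((cs.drop start).take (e + 1 - start)) = true :=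
        (isDistinct_take (cs.drop start) (e + 1 - start)
          (List.ne_nil_of_length_pos (by omega)) (by omega) (by omega)).mpr (by omega)
      rw [if_pos hhom]
      by_cases he : e = cs.length - 1
      · have hRle := headRun_le_length (cs.drop start)
        rw [hdl] at hRle
        have hk : k = 0 := by omega
        subst hk
        rw [if_pos ⟨h2, he⟩]
        exact ⟨f, [(cs.drop start).take (e + 1 - start)], rfl, rfl, by omega⟩
      · rw [if_neg (fun hand => he hand.2)]
        obtain ⟨fuel', A', heq, hlen, hfb⟩ :=
          ih cs f start (e + 1) (ret ++ [(cs.drop start).take (e + 1 - start)])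
            h1 (by omega) (by omega) (by omega) (by omega)
        refine ⟨fuel', (cs.drop start).take (e + 1 - start) :: A', ?_, ?_, ?_⟩
        · rw [heq]; simp [List.append_assoc]
        · simp [hlen]
        · omega

lemma aLoop_main (d : Nat) : ∀ (cs : List Char) (fuel start : Nat) (ret : List (List Char)),
    cs.length - 1 - start = d → 1 ≤ cs.length → start ≤ cs.length - 1 →
    (cs.length - start) * (cs.length + 2) ≤ fuel →
    ∃ A, aLoop cs fuel start start ret = some (ret ++ A) ∧
      A.length = sumSuf (cs.drop start) - 1 := by
  induction d with
  | zero =>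
      intro cs fuel start ret hd h1 h2 hf
      have hse : start = cs.length - 1 := by omega
      obtain ⟨f, rfl⟩ : ∃ f, fuel = f + 1 := ⟨fuel - 1, by
        have : 1 * 1 ≤ (cs.length - start) * (cs.length + 2) :=
          Nat.mul_le_mul (by omega) (by omega)
        omega⟩
      rw [aLoop, if_pos hse]
      refine ⟨[], by rw [List.append_nil], ?_⟩
      have hl : (cs.drop start).length = 1 := by simp; omega
      obtain ⟨c, hc⟩ : ∃ c, cs.drop start = [c] := by
        cases hcase : cs.drop start with
        | nil => rw [hcase] at hl; simp at hl
        | cons a t =>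
            rw [hcase] at hl
            simp only [List.length_cons] at hl
            exact ⟨a, by rw [List.eq_nil_of_length_eq_zero (by omega : t.length = 0)]⟩
      rw [hc]; simp [sumSuf, runLen]
  | succ d ih =>
      intro cs fuel start ret hd h1 h2 hf
      have hstart : start + 1 < cs.length := by omega
      have hfu : cs.length - start + 1 ≤ fuel := by
        have : 2 * (cs.length + 2) ≤ (cs.length - start) * (cs.length + 2) :=
          Nat.mul_le_mul_right _ (by omega)
        omega
      obtain ⟨fuel', A1, heq, hlen1, hfb⟩ :=
        aLoop_phase (headRun (cs.drop start)) cs fuel start start ret hstart le_rfl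
          (by omega) (by omega) hfu
      have hf' : (cs.length - (start + 1)) * (cs.length + 2) ≤ fuel' := by
        have e1 : (cs.length - start) * (cs.length + 2)
            = (cs.length - (start + 1)) * (cs.length + 2) + (cs.length + 2) := by
          have h9 : cs.length - start = (cs.length - (start + 1)) + 1 := by omega
          rw [h9, Nat.succ_mul]
        omega
      obtain ⟨A2, heq2, hlen2⟩ := ih cs fuel' (start + 1) (ret ++ A1) (by omega) h1 (by omega) hf'
      refine ⟨A1 ++ A2, ?_, ?_⟩
      · rw [heq, heq2, List.append_assoc]
      · rw [List.length_append, hlen1, hlen2]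
        have hcons : cs.drop start = cs[start] :: cs.drop (start + 1) :=
          List.drop_eq_getElem_cons (by omega)
        have hpos : 1 ≤ sumSuf (cs.drop (start + 1)) :=
          sumSuf_pos _ (List.ne_nil_of_length_pos (by simp; omega))
        rw [hcons]
        simp only [headRun, sumSuf]
        omega

-- reduce A's entry wrapper once the loop result and the last character are known
lemma numberOf_eq (s : String) (A : List (List Char)) (c : Char)
    (hA : aLoop s.toList ((s.toList.length + 1) * (s.toList.length + 1)) 0 0 [] = some A)
    (hc : PySem.List.pyGet? s.toList (-1) = some c) :
    numberOfDistinctSubstringPresentOptimal s = ((A ++ [[c]]).length : Int) := by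
  unfold numberOfDistinctSubstringPresentOptimal
  simp only [hA, hc]

-- ===== VERDICT (by name: the statement is the Claim_ definition above) =====
set_option maxHeartbeats 2000000 in
theorem numberOfDistinctSubstringPresentOptimal_spec : Claim_equal_numberOfDistinctSubstringPresentOptimal := by
  intro s hdom hpre
  unfold Spec_numberOfDistinctSubstringPresentOptimal
  have hne : s.toList ≠ [] := hpre
  have h1 : 1 ≤ s.toList.length := List.length_pos_of_ne_nil hne
  have hfuel : (s.toList.length - 0) * (s.toList.length + 2)
      ≤ (s.toList.length + 1) * (s.toList.length + 1) := by
    have h9 : (s.toList.length + 1) * (s.toList.length + 1)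
        = s.toList.length * (s.toList.length + 2) + 1 := by ring
    simp only [Nat.sub_zero]
    omega
  obtain ⟨A, heq, hlen⟩ :=
    aLoop_main (s.toList.length - 1 - 0) s.toList
      ((s.toList.length + 1) * (s.toList.length + 1)) 0 [] rfl h1 (by omega) hfuel
  rw [List.nil_append] at heq
  rw [List.drop_zero] at hlen
  have hget : PySem.List.pyGet? s.toList (-1) = some (s.toList.getLast hne) := by
    rw [PySem.List.pyGet?_neg_one, List.getLast?_eq_some_getLast hne]
  rw [numberOf_eq s A (s.toList.getLast hne) heq hget]
  have hsum : 1 ≤ sumSuf s.toList := sumSuf_pos _ hne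
  rw [numberOfDistinctSubstringPresentOptimal_alt,
    altGo_eq s.toList.length s.toList le_rfl 0]
  simp only [List.length_append, List.length_cons, List.length_nil, hlen]
  push_cast
  omega
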